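-- pv_equiv track=rewrite | github.com/P-Michalski/IO_RNG | lcg.py | lcg_bit_stream
-- ===== SOURCE A (Python) =====
-- from typing import List, Optional
--
-- def _int_to_bits(value: int, bits: int, msb_first: bool = True) -> List[int]:
--     if bits <= 0:
--         return []
--     if msb_first:
--         return [ (value >> i) & 1 for i in range(bits - 1, -1, -1) ]
--     else:
--         return [ (value >> i) & 1 for i in range(bits) ]
--
-- def lcg_bit_stream(seed: int, a: int, c: int, m: int, n_bits: int,
--                    bits_per_value: Optional[int] = None,
--                    msb_first: bool = True) -> List[int]:
--     seed = int(seed)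
--     a = int(a)
--     c = int(c)
--     m = int(m)
--     n_bits = int(n_bits)
--     if n_bits <= 0:
--         return []
--
--     bpv = int(bits_per_value) if bits_per_value is not None else (m.bit_length() if m > 1 else 1)
--     out: List[int] = []
--     while len(out) < n_bits:
--         seed = (a * seed + c) % m
--         bits = _int_to_bits(seed, bpv, msb_first)
--         rem = n_bits - len(out)
--         if rem >= len(bits):
--             out.extend(bits)
--         else:
--             out.extend(bits[:rem])
--     return out
-- ===== SOURCE B (Python) =====
-- from typing import List, Optional
--
-- def lcg_bit_stream(seed: int, a: int, c: int, m: int, n_bits: int,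
--                    bits_per_value: Optional[int] = None,
--                    msb_first: bool = True) -> List[int]:
--     seed = int(seed)
--     a = int(a)
--     c = int(c)
--     m = int(m)
--     n_bits = int(n_bits)
--     if n_bits <= 0:
--         return []
--
--     bpv = int(bits_per_value) if bits_per_value is not None else (m.bit_length() if m > 1 else 1)
--     # One flat pass over bit positions: the LCG state advances only when the
--     # bit index crosses a value boundary; each bit is extracted directly by
--     # index arithmetic, no per-value bit lists, slicing or remainder tracking.
--     out: List[int] = []
--     s = seed
--     for j in range(n_bits):
--         pos = j % bpv
--         if pos == 0:
--             s = (a * s + c) % m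
--         shift = bpv - 1 - pos if msb_first else pos
--         out.append((s >> shift) & 1)
--     return out
-- ===== Notes on version B (the rewrite author's own statement) =====
-- stated objective: alternative
-- what changed: Replaces A's value-at-a-time while-loop (building each value's full bit list via _int_to_bits, tracking the remainder and slicing the last chunk) by a single flat loop over bit indices 0..n_bits-1 that advances the LCG state only when the index crosses a value boundary (j % bpv == 0) and extracts each bit directly by index arithmetic, with no intermediate bit lists, slicing or remainder bookkeeping.
-- outside the precondition, e.g. on lcg_bit_stream(7, 5, 3, 0, 4, None, True): A raises ZeroDivisionError, B raises ZeroDivisionError; on lcg_bit_stream(7, 5, 3, 16, 4, -2, True): A does not finish within the time limit, B raises ValueError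
import Mathlib
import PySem

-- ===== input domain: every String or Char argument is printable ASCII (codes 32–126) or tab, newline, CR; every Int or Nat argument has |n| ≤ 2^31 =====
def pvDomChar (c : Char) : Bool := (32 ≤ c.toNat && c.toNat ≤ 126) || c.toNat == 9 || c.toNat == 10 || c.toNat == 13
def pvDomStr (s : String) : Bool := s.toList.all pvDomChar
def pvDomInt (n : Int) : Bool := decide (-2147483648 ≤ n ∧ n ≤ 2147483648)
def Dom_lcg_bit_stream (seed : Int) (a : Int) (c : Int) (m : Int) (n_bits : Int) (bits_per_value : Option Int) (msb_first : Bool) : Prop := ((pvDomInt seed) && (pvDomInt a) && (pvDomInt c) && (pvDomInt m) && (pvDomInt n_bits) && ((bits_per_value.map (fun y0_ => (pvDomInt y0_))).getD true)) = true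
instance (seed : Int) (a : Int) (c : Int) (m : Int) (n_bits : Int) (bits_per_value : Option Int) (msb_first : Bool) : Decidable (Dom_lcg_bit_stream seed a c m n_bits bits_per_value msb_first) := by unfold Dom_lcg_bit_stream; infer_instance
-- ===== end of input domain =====

-- B replaces A's value-at-a-time loop (chunk lists, remainder tracking, slicing) by one flat
-- loop over bit indices, stepping the LCG only at value boundaries and extracting each bit
-- by index arithmetic (objective: alternative, same cost).

-- ===== PORT A =====

-- _int_to_bits: in both ranges every i is ≥ 0, so 'i.toNat' is exact for Python's 'value >> i'
def intToBitsA (value : Int) (bits : Int) (msb_first : Bool) : List Int :=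
  if bits ≤ 0 then []
  else if msb_first then
    (PySem.List.pyRange (bits - 1) (-1) (-1)).map (fun i => PySem.Int.band (value >>> i.toNat) 1)
  else
    (PySem.List.pyRange 0 bits 1).map (fun i => PySem.Int.band (value >>> i.toNat) 1)

-- the while-loop of A; fuel = n_bits.toNat only makes the recursion total (under Pre_ each
-- iteration appends ≥ 1 bit, so the fuel is never exhausted before 'len(out) < n_bits' fails);
-- 'bits[:rem]' is 'bits.take rem.toNat' since rem > 0 inside the loop
def lcgLoopA (a c m bpv : Int) (msb_first : Bool) (n_bits : Int) : Nat → Int → List Int → List Int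
  | 0, _, out => out
  | fuel+1, seed, out =>
    if (out.length : Int) < n_bits then
      let seed' := PySem.Int.mod (a * seed + c) m
      let bits := intToBitsA seed' bpv msb_first
      let rem := n_bits - (out.length : Int)
      let out' := if rem ≥ (bits.length : Int) then out ++ bits else out ++ bits.take rem.toNat
      lcgLoopA a c m bpv msb_first n_bits fuel seed' out'
    else out

def lcg_bit_stream (seed : Int) (a : Int) (c : Int) (m : Int) (n_bits : Int) (bits_per_value : Option Int) (msb_first : Bool) : List Int :=
  if n_bits ≤ 0 then []
  else
    let bpv : Int := match bits_per_value with
      | some b => b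
      | none => if m > 1 then (PySem.Int.bitLength m : Int) else 1
    lcgLoopA a c m bpv msb_first n_bits n_bits.toNat seed []

-- ===== PORT B =====

-- 'for j in range(n_bits): …' — structural recursion over the index list; under Pre_ the
-- shift is ≥ 0, so 'shift.toNat' is exact for Python's 's >> shift'
def loopB (a c m bpv : Int) (msb_first : Bool) : List Int → Int → List Int
  | [], _ => []
  | j :: js, s =>
    let pos := PySem.Int.mod j bpv
    let s' := if pos = 0 then PySem.Int.mod (a * s + c) m else s
    let shift := if msb_first then bpv - 1 - pos else pos
    PySem.Int.band (s' >>> shift.toNat) 1 :: loopB a c m bpv msb_first js s'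

def lcg_bit_stream_alt (seed : Int) (a : Int) (c : Int) (m : Int) (n_bits : Int) (bits_per_value : Option Int) (msb_first : Bool) : List Int :=
  if n_bits ≤ 0 then []
  else
    let bpv : Int := match bits_per_value with
      | some b => b
      | none => if m > 1 then (PySem.Int.bitLength m : Int) else 1
    loopB a c m bpv msb_first (PySem.List.pyRange 0 n_bits 1) seed

-- ===== PRECONDITION & SPEC =====
-- Pre_ excludes, for n_bits > 0 only, m = 0 (A raises ZeroDivisionError at '% m') and an
-- effective bits_per_value ≤ 0 (A's while-loop appends nothing and never terminates).
def Pre_lcg_bit_stream (seed : Int) (a : Int) (c : Int) (m : Int) (n_bits : Int) (bits_per_value : Option Int) (msb_first : Bool) : Prop :=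
  n_bits ≤ 0 ∨ (m ≠ 0 ∧ 1 ≤ (match bits_per_value with
      | some b => b
      | none => if m > 1 then (PySem.Int.bitLength m : Int) else 1))
instance (seed : Int) (a : Int) (c : Int) (m : Int) (n_bits : Int) (bits_per_value : Option Int) (msb_first : Bool) : Decidable (Pre_lcg_bit_stream seed a c m n_bits bits_per_value msb_first) := by unfold Pre_lcg_bit_stream; infer_instance

def pvWitness_lcg_bit_stream : Int × Int × Int × Int × Int × Option Int × Bool := (7, 5, 3, 16, 10, none, true)

def Spec_lcg_bit_stream (seed : Int) (a : Int) (c : Int) (m : Int) (n_bits : Int) (bits_per_value : Option Int) (msb_first : Bool) (out : List Int) : Prop := out = lcg_bit_stream_alt seed a c m n_bits bits_per_value msb_first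
instance (seed : Int) (a : Int) (c : Int) (m : Int) (n_bits : Int) (bits_per_value : Option Int) (msb_first : Bool) (out : List Int) : Decidable (Spec_lcg_bit_stream seed a c m n_bits bits_per_value msb_first out) := by unfold Spec_lcg_bit_stream; infer_instance

-- ===== CLAIM (what is proved, stated in full; the proofs are below) =====
def Claim_equal_lcg_bit_stream : Prop := ∀ (seed : Int) (a : Int) (c : Int) (m : Int) (n_bits : Int) (bits_per_value : Option Int) (msb_first : Bool), Dom_lcg_bit_stream seed a c m n_bits bits_per_value msb_first → Pre_lcg_bit_stream seed a c m n_bits bits_per_value msb_first → Spec_lcg_bit_stream seed a c m n_bits bits_per_value msb_first (lcg_bit_stream seed a c m n_bits bits_per_value msb_first)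

-- ===== LEMMAS AND PROOFS =====

-- the canonical bit stream: bits of the first k LCG values after seed s, concatenated
def bitsFrom (a c m bpv : Int) (msb : Bool) : Nat → Int → List Int
  | 0, _ => []
  | k+1, s =>
    let s' := PySem.Int.mod (a * s + c) m
    intToBitsA s' bpv msb ++ bitsFrom a c m bpv msb k s'

def stepIter (a c m : Int) : Nat → Int → Int
  | 0, s => s
  | k+1, s => stepIter a c m k (PySem.Int.mod (a * s + c) m)

theorem length_intToBitsA (v bpv : Int) (msb : Bool) (h : 1 ≤ bpv) :
    ((intToBitsA v bpv msb).length : Int) = bpv := by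
  unfold intToBitsA
  rw [if_neg (by omega)]
  cases msb <;> simp [PySem.List.length_pyRange_one, PySem.List.length_pyRange_neg_one] <;> omega

theorem bitsFrom_append (a c m bpv : Int) (msb : Bool) (j d : Nat) (s : Int) :
    bitsFrom a c m bpv msb (j + d) s
      = bitsFrom a c m bpv msb j s ++ bitsFrom a c m bpv msb d (stepIter a c m j s) := by
  induction j generalizing s with
  | zero => simp [bitsFrom, stepIter]
  | succ j ih =>
      have : j + 1 + d = (j + d) + 1 := by omega
      rw [this]
      simp only [bitsFrom, stepIter, ih, List.append_assoc]

theorem length_bitsFrom (a c m bpv : Int) (msb : Bool) (h : 1 ≤ bpv) (k : Nat) (s : Int) :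
    ((bitsFrom a c m bpv msb k s).length : Int) = k * bpv := by
  induction k generalizing s with
  | zero => simp [bitsFrom]
  | succ k ih =>
      simp only [bitsFrom, List.length_append]
      push_cast
      rw [ih, length_intToBitsA _ _ _ h]
      ring

-- A's loop computes: out ++ the next (n_bits - len out) bits of the canonical stream
theorem lcgLoopA_eq (a c m bpv : Int) (msb : Bool) (n_bits : Int) (h : 1 ≤ bpv) :
    ∀ (fuel : Nat) (s : Int) (out : List Int), n_bits ≤ (out.length : Int) + fuel →
    lcgLoopA a c m bpv msb n_bits fuel s out
      = out ++ (bitsFrom a c m bpv msb fuel s).take (n_bits - out.length).toNat := by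
  intro fuel
  induction fuel with
  | zero =>
      intro s out hf
      simp only [lcgLoopA]
      have : (n_bits - (out.length : Int)).toNat = 0 := by omega
      simp [this]
  | succ fuel ih =>
      intro s out hf
      simp only [lcgLoopA]
      by_cases hlt : (out.length : Int) < n_bits
      · rw [if_pos hlt]
        have hblen : ((intToBitsA (PySem.Int.mod (a * s + c) m) bpv msb).length : Int) = bpv :=
          length_intToBitsA _ _ _ h
        simp only [bitsFrom]
        by_cases hrem : n_bits - (out.length : Int) ≥ ((intToBitsA (PySem.Int.mod (a * s + c) m) bpv msb).length : Int)
        · rw [if_pos hrem, ih _ _ (by simp; omega)]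
          rw [List.take_append,
              List.take_of_length_le (show (intToBitsA (PySem.Int.mod (a * s + c) m) bpv msb).length
                ≤ (n_bits - (out.length : Int)).toNat by omega),
              ← List.append_assoc]
          congr 2
          simp only [List.length_append]
          omega
        · rw [if_neg hrem, ih _ _ (by simp; omega)]
          have hz : (n_bits - ((out ++ (intToBitsA (PySem.Int.mod (a * s + c) m) bpv msb).take
              (n_bits - (out.length : Int)).toNat).length : Int)).toNat = 0 := by
            simp only [List.length_append, List.length_take]
            omega
          rw [hz]
          simp only [List.take_zero, List.append_nil]
          rw [List.take_append_of_le_length (by omega)]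
      · rw [if_neg hlt]
        have : (n_bits - (out.length : Int)).toNat = 0 := by omega
        simp [this]

-- element p of _int_to_bits(v, bpv): bit (bpv-1-p) for msb, bit p for lsb
theorem getElem_intToBitsA (v bpv : Int) (msb : Bool) (h : 1 ≤ bpv) (p : Nat)
    (hp : (p : Int) < bpv) (hlt : p < (intToBitsA v bpv msb).length) :
    (intToBitsA v bpv msb)[p]
      = PySem.Int.band (v >>> (if msb then bpv - 1 - (p : Int) else (p : Int)).toNat) 1 := by
  have h8 : (intToBitsA v bpv msb)[p]?
      = some (PySem.Int.band (v >>> (if msb then bpv - 1 - (p : Int) else (p : Int)).toNat) 1) := by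
    unfold intToBitsA
    rw [if_neg (show ¬ bpv ≤ 0 by omega)]
    by_cases hm : msb = true
    · rw [if_pos hm, if_pos hm, PySem.List.pyRange_neg_one, List.getElem?_map, List.getElem?_map,
          List.getElem?_range (show p < (bpv - 1 - (-1)).toNat by omega)]
      simp only [Option.map_some, Int.shiftRight_natCast_right]
    · rw [if_neg hm, if_neg hm, List.getElem?_map]
      have hplen2 : p < (PySem.List.pyRange 0 bpv 1).length := by
        rw [PySem.List.length_pyRange_one]; omega
      have hpr : (PySem.List.pyRange 0 bpv 1)[p]? = some ((0 : Int) + (p : Int)) := by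
        rw [List.getElem?_eq_getElem hplen2, PySem.List.getElem_pyRange_one]
      rw [hpr]
      simp [Int.shiftRight_natCast_right]
  have h9 : (intToBitsA v bpv msb)[p]? = some ((intToBitsA v bpv msb)[p]) :=
    List.getElem?_eq_getElem hlt
  rw [h9] at h8
  exact Option.some.inj h8

-- extending the tail stream by one more value does not change the first n bits
theorem take_append_bitsFrom (a c m bpv : Int) (msb : Bool) (h : 1 ≤ bpv)
    (l : List Int) (k n : Nat) (s : Int) (hn : (n : Int) ≤ (l.length : Int) + (k : Int) * bpv) :
    (l ++ bitsFrom a c m bpv msb (k + 1) s).take n = (l ++ bitsFrom a c m bpv msb k s).take n := by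
  rw [bitsFrom_append a c m bpv msb k 1 s, ← List.append_assoc,
      List.take_append_of_le_length]
  have := length_bitsFrom a c m bpv msb h k s
  simp only [List.length_append]
  omega

-- stepping the bit index: (j+1) % bpv in terms of j % bpv
theorem emod_succ_eq (j bpv : Int) :
    (j + 1) % bpv = (j % bpv + 1) % bpv := by
  have hd : bpv * (j / bpv) + j % bpv = j := Int.mul_ediv_add_emod j bpv
  have hsplit : j + 1 = (j % bpv + 1) + bpv * (j / bpv) := by omega
  rw [hsplit, Int.add_mul_emod_self_left]

-- B's flat loop over indices j, j+1, …, j+k-1 emits the canonical stream, offset by the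
-- bits of the current value already consumed (j % bpv of them; a multiple of bpv means all)
theorem loopB_eq (a c m bpv : Int) (msb : Bool) (h : 1 ≤ bpv) :
    ∀ (k : Nat) (j s : Int),
    loopB a c m bpv msb (PySem.List.pyRange j (j + k) 1) s
      = ((intToBitsA s bpv msb).drop
            (if PySem.Int.mod j bpv = 0 then bpv.toNat else (PySem.Int.mod j bpv).toNat)
          ++ bitsFrom a c m bpv msb k s).take k := by
  intro k
  induction k with
  | zero =>
      intro j s
      rw [PySem.List.pyRange_one_eq_nil (by omega)]
      simp [loopB]
  | succ k ih =>
      intro j s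
      have hmod : PySem.Int.mod j bpv = j % bpv :=
        PySem.Int.mod_eq_emod_of_pos (by omega)
      have hmod1 : PySem.Int.mod (j + 1) bpv = (j + 1) % bpv :=
        PySem.Int.mod_eq_emod_of_pos (by omega)
      have hp0 : (0 : Int) ≤ j % bpv := Int.emod_nonneg j (by omega)
      have hplt : j % bpv < bpv := Int.emod_lt_of_pos j (by omega)
      have hkey : (j + 1) % bpv = (j % bpv + 1) % bpv := emod_succ_eq j bpv
      rw [PySem.List.pyRange_one_cons (by omega)]
      simp only [loopB]
      have hlen : ((intToBitsA s bpv msb).length : Int) = bpv := length_intToBitsA _ _ _ h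
      have harg : j + 1 + ((k : Nat) : Int) = j + (((k : Nat) + 1 : Nat) : Int) := by
        push_cast; ring
      by_cases hz : PySem.Int.mod j bpv = 0
      · simp only [if_pos hz]
        set s' := PySem.Int.mod (a * s + c) m with hs'
        have hrec := ih (j + 1) s'
        rw [harg] at hrec
        rw [hrec]
        have hjz : j % bpv = 0 := by rw [← hmod]; exact hz
        have hd1 : (if PySem.Int.mod (j + 1) bpv = 0 then bpv.toNat
            else (PySem.Int.mod (j + 1) bpv).toNat) = 1 := by
          rw [hmod1, hkey, hjz]
          by_cases hb1 : bpv = 1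
          · subst hb1; norm_num
          · rw [Int.emod_eq_of_lt (by omega) (by omega), if_neg (by omega)]
            omega
        rw [hd1]
        have hdropall : (intToBitsA s bpv msb).drop bpv.toNat = [] :=
          List.drop_of_length_le (by omega)
        rw [hdropall, List.nil_append]
        show _ = (bitsFrom a c m bpv msb (k + 1) s).take (k + 1)
        simp only [bitsFrom, ← hs']
        have hlen' : ((intToBitsA s' bpv msb).length : Int) = bpv := length_intToBitsA _ _ _ h
        have hne : 0 < (intToBitsA s' bpv msb).length := by omega
        have hsplit : intToBitsA s' bpv msb
            = (intToBitsA s' bpv msb)[0]'hne :: (intToBitsA s' bpv msb).drop 1 := by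
          have hzero : (intToBitsA s' bpv msb).drop 0 = intToBitsA s' bpv msb := List.drop_zero
          conv_lhs => rw [← hzero]
          exact (List.getElem_cons_drop hne).symm
        conv_rhs => rw [hsplit]
        rw [List.cons_append, List.take_succ_cons]
        congr 1
        rw [getElem_intToBitsA s' bpv msb h 0 (by omega) hne]
        simp [hz]
      · simp only [if_neg hz]
        have hp1 : (1 : Int) ≤ j % bpv := by
          rw [hmod] at hz; omega
        have hrec := ih (j + 1) s
        rw [harg] at hrec
        rw [hrec]
        have hd1 : (if PySem.Int.mod (j + 1) bpv = 0 then bpv.toNat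
            else (PySem.Int.mod (j + 1) bpv).toNat) = (j % bpv).toNat + 1 := by
          rw [hmod1, hkey]
          by_cases hb : j % bpv + 1 = bpv
          · rw [hb, Int.emod_self, if_pos rfl]; omega
          · rw [Int.emod_eq_of_lt (by omega) (by omega), if_neg (by omega)]; omega
        rw [hd1, hmod]
        have hplen : (j % bpv).toNat < (intToBitsA s bpv msb).length := by omega
        rw [← List.getElem_cons_drop hplen, List.cons_append, List.take_succ_cons]
        congr 1
        · rw [getElem_intToBitsA s bpv msb h (j % bpv).toNat (by omega) hplen]
          have hcast : (((j % bpv).toNat : Nat) : Int) = j % bpv := Int.toNat_of_nonneg hp0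
          rw [hcast]
        · have hk1 : (k : Int) ≤ (k : Int) * bpv := le_mul_of_one_le_right (Int.natCast_nonneg k) h
          exact (take_append_bitsFrom a c m bpv msb h _ k k s
            (by have hlen2 := Int.natCast_nonneg ((intToBitsA s bpv msb).drop ((j % bpv).toNat + 1)).length
                omega)).symm

-- ===== VERDICT (by name: the statement is the Claim_ definition above) =====
theorem lcg_bit_stream_spec : Claim_equal_lcg_bit_stream := by
  intro seed a c m n_bits bpvo msb _hdom hpre
  unfold Spec_lcg_bit_stream
  by_cases hn : n_bits ≤ 0
  · simp [lcg_bit_stream, lcg_bit_stream_alt, hn]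
  · simp only [lcg_bit_stream, lcg_bit_stream_alt, if_neg hn]
    unfold Pre_lcg_bit_stream at hpre
    generalize hb : (match bpvo with
      | some b => b
      | none => if m > 1 then ((PySem.Int.bitLength m : Nat) : Int) else 1) = bpv
    rw [hb] at hpre
    have h : 1 ≤ bpv := by
      rcases hpre with h0 | ⟨_, h1⟩
      · omega
      · exact h1
    have hA := lcgLoopA_eq a c m bpv msb n_bits h n_bits.toNat seed [] (by simp only [List.length_nil, Nat.cast_zero, zero_add]; omega)
    have hcast : (0 : Int) + (n_bits.toNat : Int) = n_bits := by omega
    have hB := loopB_eq a c m bpv msb h n_bits.toNat 0 seed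
    rw [hcast] at hB
    have hz : PySem.Int.mod 0 bpv = 0 := by
      rw [PySem.Int.mod_eq_emod_of_pos (by omega)]; simp
    rw [if_pos hz] at hB
    have hdropall : (intToBitsA seed bpv msb).drop bpv.toNat = [] :=
      List.drop_of_length_le (by have := length_intToBitsA seed bpv msb h; omega)
    rw [hdropall, List.nil_append] at hB
    rw [hA, hB]
    simp
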